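-- pv_equiv track=rewrite | github.com/themightyzq/idtech-geometry-toolkit | src/pipeline/passes/gate_passes.py | _calculate_branch_depth
-- ===== SOURCE A (Python) =====
-- from typing import List, Dict, Any, Optional, Tuple, Set
-- from collections import deque
--
-- def _calculate_branch_depth(
--     room_id: int, main_path_set: Set[int], adj: Dict[int, List[int]]
-- ) -> int:
--     """Calculate how many rooms deep a branch room is from the main path."""
--     if room_id in main_path_set:
--         return 0
--
--     visited = {room_id}
--     queue = deque([(room_id, 0)])
--
--     while queue:
--         current, depth = queue.popleft()
--
--         for neighbor in adj.get(current, []):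
--             if neighbor in main_path_set:
--                 return depth + 1
--             if neighbor not in visited:
--                 visited.add(neighbor)
--                 queue.append((neighbor, depth + 1))
--
--     return 0  # Shouldn't happen in connected graph
-- ===== SOURCE B (Python) =====
-- def _calculate_branch_depth(room_id, main_path_set, adj):
--     """Bellman-Ford-style relaxation: build a distance-to-main-path table for the
--     whole graph by repeatedly relaxing every edge until a fixpoint, then read off
--     the answer for room_id (0 for main-path rooms and for rooms with no route)."""
--     if room_id in main_path_set:
--         return 0
--
--     dist = {m: 0 for m in main_path_set}
--     changed = True
--     while changed:
--         changed = False
--         for u, nbrs in adj.items():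
--             for v in nbrs:
--                 if v in dist:
--                     cand = dist[v] + 1
--                     if u not in dist or cand < dist[u]:
--                         dist[u] = cand
--                         changed = True
--     return dist.get(room_id, 0)
-- ===== Notes on version B (the rewrite author's own statement) =====
-- stated objective: alternative
-- what changed: Replaces the single-source BFS (deque of (node,depth) pairs with a visited set) by a Bellman-Ford-style relaxation: a distance-to-main-path table over the whole graph is relaxed edge by edge until a fixpoint, and the answer is read off for room_id.
import Mathlib
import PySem

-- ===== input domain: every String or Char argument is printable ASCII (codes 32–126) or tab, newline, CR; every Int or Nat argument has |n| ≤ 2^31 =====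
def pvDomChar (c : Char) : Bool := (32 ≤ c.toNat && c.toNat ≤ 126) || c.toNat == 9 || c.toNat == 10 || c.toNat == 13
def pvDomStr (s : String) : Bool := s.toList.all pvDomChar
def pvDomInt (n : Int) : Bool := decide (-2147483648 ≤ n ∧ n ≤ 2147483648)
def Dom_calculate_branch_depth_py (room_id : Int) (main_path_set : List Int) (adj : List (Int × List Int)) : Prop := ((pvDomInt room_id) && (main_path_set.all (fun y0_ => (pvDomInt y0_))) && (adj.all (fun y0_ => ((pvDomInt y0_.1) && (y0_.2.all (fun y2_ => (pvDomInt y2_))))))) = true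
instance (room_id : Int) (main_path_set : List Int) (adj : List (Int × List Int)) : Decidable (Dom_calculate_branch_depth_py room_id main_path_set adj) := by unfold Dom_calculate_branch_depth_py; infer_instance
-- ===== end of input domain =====

-- B replaces A's single-source BFS (deque of (node, depth) pairs + visited set) by a
-- Bellman-Ford-style relaxation: a distance-to-main-path table over the whole graph,
-- relaxed edge by edge until a fixpoint, from which the answer for room_id is read off.

-- ===== PORT A =====
-- every node the search can ever enqueue beyond the start is a neighbour in adj (fuel bound)
def pvAllNbrs (adj : List (Int × List Int)) : List Int := adj.flatMap Prod.snd

-- 'for neighbor in adj.get(current, []):' with the early 'return depth + 1'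
def pvScanA (main_path_set : List Int) : List Int → Int → PySem.Set Int → List (Int × Int) → Sum Int (PySem.Set Int × List (Int × Int))
  | [], _, visited, acc => .inr (visited, acc)
  | n :: ns, depth, visited, acc =>
    if main_path_set.contains n then .inl (depth + 1)
    else if PySem.Set.contains visited n then pvScanA main_path_set ns depth visited acc
    else pvScanA main_path_set ns depth (PySem.Set.add visited n) (acc ++ [(n, depth + 1)])

-- 'while queue:' popping (current, depth) from the left; the fuel only makes the loop total
def pvLoopA (main_path_set : List Int) (adj : List (Int × List Int)) : Nat → PySem.Set Int → List (Int × Int) → Int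
  | 0, _, _ => 0
  | _ + 1, _, [] => 0
  | fuel + 1, visited, (current, depth) :: rest =>
    match pvScanA main_path_set ((PySem.Dict.mk adj).getD current []) depth visited [] with
    | .inl r => r
    | .inr (visited', newPairs) => pvLoopA main_path_set adj fuel visited' (rest ++ newPairs)

def calculate_branch_depth_py (room_id : Int) (main_path_set : List Int) (adj : List (Int × List Int)) : Int :=
  if main_path_set.contains room_id then 0
  else pvLoopA main_path_set adj ((pvAllNbrs adj).length + 2) (PySem.Set.ofList [room_id]) [(room_id, 0)]

-- ===== PORT B =====
-- 'adj.items()': the (key, value) pairs of the Python dict, first occurrence of each key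
def pvItems (adj : List (Int × List Int)) : List (Int × List Int) :=
  (PySem.List.dedup (adj.map Prod.fst)).map (fun u => (u, (PySem.Dict.mk adj).getD u []))

-- 'for v in nbrs: if v in dist: …' — relax all edges u -> v, threading (dist, changed)
def pvRelax (u : Int) : List Int → PySem.Dict Int Int × Bool → PySem.Dict Int Int × Bool
  | [], st => st
  | v :: vs, (dist, ch) =>
    match dist.get? v with
    | none => pvRelax u vs (dist, ch)
    | some dv =>
      match dist.get? u with
      | none => pvRelax u vs (dist.insert u (dv + 1), true)
      | some du =>
        if dv + 1 < du then pvRelax u vs (dist.insert u (dv + 1), true)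
        else pvRelax u vs (dist, ch)

-- 'for u, nbrs in adj.items():'
def pvPass : List (Int × List Int) → PySem.Dict Int Int × Bool → PySem.Dict Int Int × Bool
  | [], st => st
  | (u, ns) :: rest, st => pvPass rest (pvRelax u ns st)

-- 'while changed:' — the fuel only makes the loop total (the relaxation reaches a fixpoint)
def pvBFLoop (items : List (Int × List Int)) : Nat → PySem.Dict Int Int → PySem.Dict Int Int
  | 0, dist => dist
  | fuel + 1, dist =>
    match pvPass items (dist, false) with
    | (dist', true) => pvBFLoop items fuel dist'
    | (dist', false) => dist'

def calculate_branch_depth_py_alt (room_id : Int) (main_path_set : List Int) (adj : List (Int × List Int)) : Int :=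
  if main_path_set.contains room_id then 0
  else
    let dist0 := main_path_set.foldl (fun d m => d.insert m (0 : Int)) PySem.Dict.empty
    let K := main_path_set.length + adj.length
    (pvBFLoop (pvItems adj) (K * K + 1) dist0).getD room_id 0

-- ===== PRECONDITION & SPEC =====
def Spec_calculate_branch_depth_py (room_id : Int) (main_path_set : List Int) (adj : List (Int × List Int)) (out : Int) : Prop := out = calculate_branch_depth_py_alt room_id main_path_set adj
instance (room_id : Int) (main_path_set : List Int) (adj : List (Int × List Int)) (out : Int) : Decidable (Spec_calculate_branch_depth_py room_id main_path_set adj out) := by unfold Spec_calculate_branch_depth_py; infer_instance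

-- ===== CLAIM (what is proved, stated in full; the proofs are below) =====
def Claim_equal_calculate_branch_depth_py : Prop := ∀ (room_id : Int) (main_path_set : List Int) (adj : List (Int × List Int)), Dom_calculate_branch_depth_py room_id main_path_set adj → Spec_calculate_branch_depth_py room_id main_path_set adj (calculate_branch_depth_py room_id main_path_set adj)

-- ===== LEMMAS AND PROOFS =====

-- neighbours of a node (first-match lookup, as both ports use)
def pvNb (adj : List (Int × List Int)) (u : Int) : List Int := (PySem.Dict.mk adj).getD u []

-- u is reachable from room in exactly t forward steps
def pvReach (room : Int) (adj : List (Int × List Int)) : Nat → Int → Prop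
  | 0, u => u = room
  | k + 1, u => ∃ w, pvReach room adj k w ∧ u ∈ pvNb adj w

-- there is a forward path of length n from u to some main-path node
def pvPathTo (main : List Int) (adj : List (Int × List Int)) : Nat → Int → Prop
  | 0, u => u ∈ main
  | n + 1, u => ∃ v, v ∈ pvNb adj u ∧ pvPathTo main adj n v

def pvMinD (room : Int) (adj : List (Int × List Int)) (k : Nat) (u : Int) : Prop :=
  pvReach room adj k u ∧ ∀ j < k, ¬ pvReach room adj j u

def pvSilent (room : Int) (main : List Int) (adj : List (Int × List Int)) (k : Nat) : Prop :=
  ∀ t ≤ k, ∀ m ∈ main, ¬ pvReach room adj t m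

-- BFS level invariant after k completed (silent) levels
def pvInv (room : Int) (main : List Int) (adj : List (Int × List Int)) (k : Nat) (v : PySem.Set Int) (f : List Int) : Prop :=
  (∀ u, u ∈ v ↔ ∃ j ≤ k, pvReach room adj j u) ∧
  (∀ u, u ∈ f ↔ pvMinD room adj k u) ∧
  pvSilent room main adj k

-- ---- the level-synchronous reference loop L (proof device relating A's queue to levels) ----
def pvScanL (main_path_set : List Int) : List Int → Int → PySem.Set Int → List Int → Sum Int (PySem.Set Int × List Int)
  | [], _, visited, nxt => .inr (visited, nxt)
  | n :: ns, depth, visited, nxt =>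
    if main_path_set.contains n then .inl (depth + 1)
    else if PySem.Set.contains visited n then pvScanL main_path_set ns depth visited nxt
    else pvScanL main_path_set ns depth (PySem.Set.add visited n) (nxt ++ [n])

def pvLevelL (main_path_set : List Int) (adj : List (Int × List Int)) : List Int → Int → PySem.Set Int → List Int → Sum Int (PySem.Set Int × List Int)
  | [], _, visited, nxt => .inr (visited, nxt)
  | c :: cs, depth, visited, nxt =>
    match pvScanL main_path_set (pvNb adj c) depth visited nxt with
    | .inl r => .inl r
    | .inr (visited', nxt') => pvLevelL main_path_set adj cs depth visited' nxt'

def pvLoopL (main_path_set : List Int) (adj : List (Int × List Int)) : Nat → PySem.Set Int → List Int → Int → Int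
  | 0, _, _, _ => 0
  | _ + 1, _, [], _ => 0
  | fuel + 1, visited, frontier, depth =>
    match pvLevelL main_path_set adj frontier depth visited [] with
    | .inl r => r
    | .inr (visited', nxt) => pvLoopL main_path_set adj fuel visited' nxt (depth + 1)

-- unvisited adj-neighbours: the potential bounding the loops' fuel
def pvUV (adj : List (Int × List Int)) (v : PySem.Set Int) : Nat :=
  ((pvAllNbrs adj).filter (fun x => !(PySem.Set.contains v x))).length

theorem pvScanAB (mps : List Int) (ns : List Int) (d : Int) (v : PySem.Set Int) (acc : List Int) :
    pvScanA mps ns d v (acc.map (fun x => (x, d + 1))) =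
      (match pvScanL mps ns d v acc with
       | .inl r => .inl r
       | .inr (v', ids) => .inr (v', ids.map (fun x => (x, d + 1)))) := by
  induction ns generalizing v acc with
  | nil => simp [pvScanA, pvScanL]
  | cons n ns ih =>
    simp only [pvScanA, pvScanL]
    split_ifs with h1 h2
    · rfl
    · exact ih v acc
    · have := ih (PySem.Set.add v n) (acc ++ [n])
      simpa [List.map_append] using this

theorem pvScanL_acc (mps : List Int) (ns : List Int) (d : Int) (v : PySem.Set Int) (acc : List Int) :
    pvScanL mps ns d v acc =
      (match pvScanL mps ns d v [] with
       | .inl r => .inl r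
       | .inr (v', ids) => .inr (v', acc ++ ids)) := by
  induction ns generalizing v acc with
  | nil => simp [pvScanL]
  | cons n ns ih =>
    simp only [pvScanL]
    split_ifs with h1 h2
    · rfl
    · exact ih v acc
    · rw [ih (PySem.Set.add v n) (acc ++ [n]), ih (PySem.Set.add v n) ([] ++ [n])]
      cases h : pvScanL mps ns d (PySem.Set.add v n) [] <;> simp

theorem pvGetD_subset (adj : List (Int × List Int)) (c : Int) :
    ∀ x ∈ pvNb adj c, x ∈ pvAllNbrs adj := by
  unfold pvNb
  induction adj with
  | nil => simp [PySem.Dict.getD, PySem.Dict.get?, pvAllNbrs]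
  | cons p rest ih =>
    intro x hx
    rw [PySem.Dict.getD, PySem.Dict.get?_mk_cons] at hx
    simp only [pvAllNbrs, List.flatMap_cons, List.mem_append]
    by_cases h : p.1 == c
    · simp [h] at hx; left; exact hx
    · simp [h] at hx
      right
      exact ih x (by rw [PySem.Dict.getD]; exact hx)

theorem pvUV_add_lt (adj : List (Int × List Int)) (v : PySem.Set Int) (x : Int)
    (hx : x ∈ pvAllNbrs adj) (hv : PySem.Set.contains v x = false) :
    pvUV adj (PySem.Set.add v x) < pvUV adj v := by
  unfold pvUV
  have hxv : x ∉ v := by simpa [PySem.Set.contains] using hv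
  have hadd : PySem.Set.add v x = v ++ [x] := by simp [PySem.Set.add, hxv]
  rw [hadd]
  have hpred : ∀ y : Int, (!(PySem.Set.contains (v ++ [x]) y)) = ((!(y == x)) && (!(PySem.Set.contains v y))) := by
    intro y
    simp [PySem.Set.contains]
    by_cases h : y = x <;> simp [h]
  simp only [hpred, ← List.filter_filter]
  apply List.length_filter_lt_length_iff_exists.mpr
  refine ⟨x, ?_, by simp⟩
  simp only [List.mem_filter]
  exact ⟨hx, by simpa [PySem.Set.contains] using hxv⟩

theorem pvScanL_inr (mps : List Int) (adj : List (Int × List Int)) (d : Int) :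
    ∀ (ns : List Int) (v v1 : PySem.Set Int) (acc acc' : List Int),
      (∀ x ∈ ns, x ∈ pvAllNbrs adj) →
      pvScanL mps ns d v acc = .inr (v1, acc') →
      pvUV adj v1 + acc'.length ≤ pvUV adj v + acc.length ∧
        acc.length ≤ acc'.length ∧ (acc'.length = acc.length → v1 = v) := by
  intro ns
  induction ns with
  | nil =>
    intro v v1 acc acc' _ h
    simp [pvScanL] at h
    obtain ⟨rfl, rfl⟩ := h
    exact ⟨le_refl _, le_refl _, fun _ => rfl⟩
  | cons n ns ih =>
    intro v v1 acc acc' hsub h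
    simp only [pvScanL] at h
    split_ifs at h with h1 h2
    · exact (ih v v1 acc acc' (fun x hx => hsub x (List.mem_cons_of_mem _ hx)) h)
    · have hn : n ∈ pvAllNbrs adj := hsub n List.mem_cons_self
      have hlt := pvUV_add_lt adj v n hn (by simpa using h2)
      obtain ⟨ha, hb, _⟩ := ih (PySem.Set.add v n) v1 (acc ++ [n]) acc'
        (fun x hx => hsub x (List.mem_cons_of_mem _ hx)) h
      simp only [List.length_append, List.length_cons, List.length_nil] at ha hb
      refine ⟨by omega, by omega, fun hc => by omega⟩

theorem pvMain (mps : List Int) (adj : List (Int × List Int)) :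
    ∀ (k j : Nat) (v : PySem.Set Int) (cur nxt : List Int) (d : Int) (fA fB : Nat),
      pvUV adj v ≤ k →
      2 * (cur.length + nxt.length) + (if cur = [] then 1 else 0) ≤ j →
      cur.length + nxt.length + pvUV adj v ≤ fA →
      pvUV adj v + (if nxt = [] then 0 else 1) ≤ fB →
      pvLoopA mps adj fA v (cur.map (fun x => (x, d)) ++ nxt.map (fun x => (x, d + 1))) =
        (match pvLevelL mps adj cur d v nxt with
         | .inl r => r
         | .inr (v', nf) => pvLoopL mps adj fB v' nf (d + 1)) := by
  intro k
  induction k using Nat.strong_induction_on with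
  | _ k ihk =>
  intro j
  induction j using Nat.strong_induction_on with
  | _ j ihj =>
  intro v cur nxt d fA fB hk hj hfA hfB
  match cur with
  | [] =>
    simp only [pvLevelL]
    match nxt with
    | [] =>
      cases fA <;> cases fB <;> simp [pvLoopA, pvLoopL]
    | n :: rest =>
      cases fB with
      | zero => simp at hfB
      | succ fB' =>
      simp only [pvLoopL]
      have := ihj (j - 1) (by simp at hj; omega) v (n :: rest) [] (d + 1) fA fB'
        hk (by simp at hj ⊢; omega) (by simp at hfA ⊢; omega) (by simp at hfB ⊢; omega)
      simpa using this
  | c :: cur' =>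
    cases fA with
    | zero => simp at hfA
    | succ fA' =>
    simp only [List.map_cons, List.cons_append, pvLoopA, pvLevelL]
    have hAB := pvScanAB mps (pvNb adj c) d v []
    rw [pvScanL_acc mps (pvNb adj c) d v nxt]
    cases hs : pvScanL mps (pvNb adj c) d v [] with
    | inl r =>
      rw [hs] at hAB
      simp only [List.map_nil] at hAB
      rw [show ((PySem.Dict.mk adj).getD c []) = pvNb adj c from rfl, hAB]
    | inr p =>
      obtain ⟨v1, ids⟩ := p
      rw [hs] at hAB
      simp only [List.map_nil] at hAB
      rw [show ((PySem.Dict.mk adj).getD c []) = pvNb adj c from rfl, hAB]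
      simp only
      obtain ⟨huv, -, hid0⟩ := pvScanL_inr mps adj d _ v v1 [] ids (pvGetD_subset adj c) hs
      simp only [List.length_nil, Nat.add_zero] at huv hid0
      have hgoalq : (cur'.map (fun x => (x, d)) ++ nxt.map (fun x => (x, d + 1))) ++ ids.map (fun x => (x, d + 1))
          = cur'.map (fun x => (x, d)) ++ (nxt ++ ids).map (fun x => (x, d + 1)) := by
        rw [List.map_append, List.append_assoc]
      rw [hgoalq]
      match ids, huv, hid0 with
      | [], huv, hid0 =>
        have hv1 : v1 = v := hid0 rfl
        subst hv1
        have := ihj (j - 1) (by simp at hj; omega) v1 cur' nxt d fA' fB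
          hk (by simp at hj ⊢; split_ifs <;> omega) (by simp at hfA ⊢; omega) hfB
        simpa using this
      | i :: ids', huv, _ =>
        have hlt : pvUV adj v1 < pvUV adj v := by
          have h' := huv; simp at h'; omega
        have hfa2 : cur'.length + (nxt ++ i :: ids').length + pvUV adj v1 ≤ fA' := by
          have h' := huv; simp at h' hfA ⊢; omega
        have hfb2 : pvUV adj v1 + (if nxt ++ i :: ids' = [] then 0 else 1) ≤ fB := by
          have hif : (if nxt ++ i :: ids' = ([] : List Int) then 0 else 1) = 1 := by simp
          rw [hif]
          have h' := huv; simp at h'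
          omega
        exact ihk (k - 1) (by omega) (2 * (cur'.length + (nxt ++ i :: ids').length) + (if cur' = [] then 1 else 0))
          v1 cur' (nxt ++ i :: ids') d fA' fB (by omega) (le_refl _) hfa2 hfb2

-- A equals the level-synchronous reference loop
theorem pvA_eq_L (room : Int) (mps : List Int) (adj : List (Int × List Int)) (h : mps.contains room = false) :
    calculate_branch_depth_py room mps adj =
      pvLoopL mps adj ((pvAllNbrs adj).length + 2) (PySem.Set.ofList [room]) [room] 0 := by
  unfold calculate_branch_depth_py
  simp only [h, Bool.false_eq_true, if_false]
  have huv : pvUV adj (PySem.Set.ofList [room]) ≤ (pvAllNbrs adj).length :=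
    List.length_filter_le _ _
  have hmain := pvMain mps adj (pvUV adj (PySem.Set.ofList [room])) 2
    (PySem.Set.ofList [room]) [room] [] 0 ((pvAllNbrs adj).length + 2) ((pvAllNbrs adj).length + 1)
    (le_refl _) (by simp) (by simp; omega) (by simp; omega)
  simp only [List.map_cons, List.map_nil, List.append_nil] at hmain
  rw [hmain]
  rw [show (pvAllNbrs adj).length + 2 = ((pvAllNbrs adj).length + 1) + 1 from rfl]
  simp only [pvLoopL]

-- a least witness of a nonempty ℕ-predicate
theorem pvLeast (P : Nat → Prop) (h : ∃ n, P n) : ∃ n, P n ∧ ∀ m < n, ¬ P m := by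
  haveI : DecidablePred P := fun n => Classical.propDecidable (P n)
  exact ⟨Nat.find h, Nat.find_spec h, fun m hm => Nat.find_min h hm⟩

theorem pvSet_contains_iff (s : PySem.Set Int) (x : Int) :
    PySem.Set.contains s x = true ↔ x ∈ s := by
  simp [PySem.Set.contains]

-- ---- scan / level characterisations ----
theorem pvScanL_hit (mps : List Int) (ns : List Int) (d : Int) (v : PySem.Set Int) (acc : List Int)
    (h : ∃ n ∈ ns, n ∈ mps) : pvScanL mps ns d v acc = .inl (d + 1) := by
  induction ns generalizing v acc with
  | nil => simp at h
  | cons n ns ih =>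
    obtain ⟨n', hn', hm⟩ := h
    simp only [pvScanL]
    by_cases hn : n ∈ mps
    · simp [hn]
    · have htl : n' ∈ ns := by
        rcases List.mem_cons.mp hn' with rfl | h1
        · exact absurd hm hn
        · exact h1
      rw [if_neg (by simpa using hn)]
      split_ifs <;> exact ih _ _ ⟨n', htl, hm⟩

theorem pvScanL_miss (mps : List Int) (ns : List Int) (d : Int) (v : PySem.Set Int) (acc : List Int)
    (h : ∀ n ∈ ns, n ∉ mps) :
    ∃ v' acc', pvScanL mps ns d v acc = .inr (v', acc') ∧
      (∀ y, y ∈ v' ↔ y ∈ v ∨ y ∈ ns) ∧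
      (∀ y, y ∈ acc' ↔ y ∈ acc ∨ (y ∈ ns ∧ y ∉ v)) := by
  induction ns generalizing v acc with
  | nil => exact ⟨v, acc, by simp [pvScanL]⟩
  | cons n ns ih =>
    have hn : n ∉ mps := h n List.mem_cons_self
    have hc : mps.contains n = false := by
      simpa using fun hcc => hn (List.contains_iff_mem.mp hcc)
    simp only [pvScanL, hc, Bool.false_eq_true, if_false]
    by_cases hv : n ∈ v
    · rw [if_pos (pvSet_contains_iff v n |>.mpr hv)]
      obtain ⟨v', acc', heq, hv', hacc'⟩ := ih v acc (fun x hx => h x (List.mem_cons_of_mem _ hx))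
      refine ⟨v', acc', heq, ?_, ?_⟩
      · intro y
        rw [hv' y]
        constructor
        · rintro (hy | hy)
          · exact Or.inl hy
          · exact Or.inr (List.mem_cons_of_mem _ hy)
        · rintro (hy | hy)
          · exact Or.inl hy
          · rcases List.mem_cons.mp hy with rfl | hy
            · exact Or.inl hv
            · exact Or.inr hy
      · intro y
        rw [hacc' y]
        constructor
        · rintro (hy | ⟨hy, hyv⟩)
          · exact Or.inl hy
          · exact Or.inr ⟨List.mem_cons_of_mem _ hy, hyv⟩
        · rintro (hy | ⟨hy, hyv⟩)
          · exact Or.inl hy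
          · rcases List.mem_cons.mp hy with rfl | hy
            · exact absurd hv hyv
            · exact Or.inr ⟨hy, hyv⟩
    · rw [if_neg (by simpa using hv)]
      obtain ⟨v', acc', heq, hv', hacc'⟩ :=
        ih (PySem.Set.add v n) (acc ++ [n]) (fun x hx => h x (List.mem_cons_of_mem _ hx))
      refine ⟨v', acc', heq, ?_, ?_⟩
      · intro y
        rw [hv' y, PySem.Set.mem_add]
        constructor
        · rintro ((hy | rfl) | hy)
          · exact Or.inl hy
          · exact Or.inr List.mem_cons_self
          · exact Or.inr (List.mem_cons_of_mem _ hy)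
        · rintro (hy | hy)
          · exact Or.inl (Or.inl hy)
          · rcases List.mem_cons.mp hy with rfl | hy
            · exact Or.inl (Or.inr rfl)
            · exact Or.inr hy
      · intro y
        rw [hacc' y]
        simp only [List.mem_append, List.mem_singleton, PySem.Set.mem_add]
        constructor
        · rintro ((hy | rfl) | ⟨hy, hyv⟩)
          · exact Or.inl hy
          · exact Or.inr ⟨List.mem_cons_self, hv⟩
          · exact Or.inr ⟨List.mem_cons_of_mem _ hy, fun hyy => hyv (Or.inl hyy)⟩
        · rintro (hy | ⟨hy, hyv⟩)
          · exact Or.inl (Or.inl hy)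
          · rcases List.mem_cons.mp hy with rfl | hy
            · exact Or.inl (Or.inr rfl)
            · by_cases hyn : y = n
              · exact Or.inl (Or.inr hyn)
              · exact Or.inr ⟨hy, by simp [hyv, hyn]⟩

theorem pvLevelL_hit (mps : List Int) (adj : List (Int × List Int)) (cs : List Int) (d : Int)
    (v : PySem.Set Int) (nxt : List Int)
    (h : ∃ c ∈ cs, ∃ n ∈ pvNb adj c, n ∈ mps) :
    pvLevelL mps adj cs d v nxt = .inl (d + 1) := by
  induction cs generalizing v nxt with
  | nil => simp at h
  | cons c cs ih =>
    obtain ⟨c', hc', n, hn, hm⟩ := h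
    simp only [pvLevelL]
    by_cases hc : ∃ n ∈ pvNb adj c, n ∈ mps
    · rw [pvScanL_hit mps _ d v nxt hc]
    · have hmiss : ∀ n ∈ pvNb adj c, n ∉ mps := by
        intro x hx hxm; exact hc ⟨x, hx, hxm⟩
      obtain ⟨v1, nxt1, heq, -, -⟩ := pvScanL_miss mps _ d v nxt hmiss
      rw [heq]
      have htl : c' ∈ cs := by
        rcases List.mem_cons.mp hc' with rfl | h1
        · exact absurd hm (hmiss n hn)
        · exact h1
      exact ih v1 nxt1 ⟨c', htl, n, hn, hm⟩

theorem pvLevelL_miss (mps : List Int) (adj : List (Int × List Int)) (cs : List Int) (d : Int)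
    (v : PySem.Set Int) (nxt : List Int)
    (h : ∀ c ∈ cs, ∀ n ∈ pvNb adj c, n ∉ mps) :
    ∃ v' f', pvLevelL mps adj cs d v nxt = .inr (v', f') ∧
      (∀ y, y ∈ v' ↔ y ∈ v ∨ ∃ c ∈ cs, y ∈ pvNb adj c) ∧
      (∀ y, y ∈ f' ↔ y ∈ nxt ∨ ((∃ c ∈ cs, y ∈ pvNb adj c) ∧ y ∉ v)) := by
  induction cs generalizing v nxt with
  | nil => exact ⟨v, nxt, by simp [pvLevelL]⟩
  | cons c cs ih =>
    have hmiss : ∀ n ∈ pvNb adj c, n ∉ mps := h c List.mem_cons_self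
    obtain ⟨v1, nxt1, heq, hv1, hn1⟩ := pvScanL_miss mps _ d v nxt hmiss
    simp only [pvLevelL, heq]
    obtain ⟨v', f', heq', hv', hf'⟩ := ih v1 nxt1 (fun c' hc' => h c' (List.mem_cons_of_mem _ hc'))
    refine ⟨v', f', heq', ?_, ?_⟩
    · intro y
      rw [hv' y, hv1 y]
      constructor
      · rintro ((hy | hy) | ⟨c', hc', hy⟩)
        · exact Or.inl hy
        · exact Or.inr ⟨c, List.mem_cons_self, hy⟩
        · exact Or.inr ⟨c', List.mem_cons_of_mem _ hc', hy⟩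
      · rintro (hy | ⟨c', hc', hy⟩)
        · exact Or.inl (Or.inl hy)
        · rcases List.mem_cons.mp hc' with rfl | h1
          · exact Or.inl (Or.inr hy)
          · exact Or.inr ⟨c', h1, hy⟩
    · intro y
      rw [hf' y, hn1 y]
      constructor
      · rintro ((hy | ⟨hy, hyv⟩) | ⟨⟨c', hc', hy⟩, hyv1⟩)
        · exact Or.inl hy
        · exact Or.inr ⟨⟨c, List.mem_cons_self, hy⟩, hyv⟩
        · exact Or.inr ⟨⟨c', List.mem_cons_of_mem _ hc', hy⟩,
            fun hyv => hyv1 ((hv1 y).mpr (Or.inl hyv))⟩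
      · rintro (hy | ⟨⟨c', hc', hy⟩, hyv⟩)
        · exact Or.inl (Or.inl hy)
        · rcases List.mem_cons.mp hc' with rfl | h1
          · exact Or.inl (Or.inr ⟨hy, hyv⟩)
          · by_cases hyc : y ∈ pvNb adj c
            · exact Or.inl (Or.inr ⟨hyc, hyv⟩)
            · refine Or.inr ⟨⟨c', h1, hy⟩, ?_⟩
              intro hyv1
              rcases (hv1 y).mp hyv1 with h2 | h2
              · exact hyv h2
              · exact hyc h2


-- ---- level contiguity ----
theorem pvContig (room : Int) (adj : List (Int × List Int)) (k : Nat)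
    (hne : ¬ ∃ u, pvMinD room adj k u) :
    ∀ t, k ≤ t → ∀ y, pvReach room adj t y → ∃ j < k, pvReach room adj j y := by
  have hbase : ∀ y, pvReach room adj k y → ∃ j < k, pvReach room adj j y := by
    intro y hy
    obtain ⟨j0, hP, hminj⟩ := pvLeast (fun j => pvReach room adj j y) ⟨k, hy⟩
    have hj0k : j0 ≤ k := by
      by_contra hgt
      exact hminj k (by omega) hy
    rcases Nat.lt_or_ge j0 k with hlt | hge
    · exact ⟨j0, hlt, hP⟩
    · have : j0 = k := le_antisymm hj0k hge
      subst this
      exact (hne ⟨y, hP, hminj⟩).elim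
  intro t hkt
  induction t, hkt using Nat.le_induction with
  | base => exact hbase
  | succ t ht ih =>
    intro y hy
    obtain ⟨w, hw, hyw⟩ := hy
    obtain ⟨j, hj, hrj⟩ := ih w hw
    have hr1 : pvReach room adj (j + 1) y := ⟨w, hrj, hyw⟩
    rcases Nat.lt_or_ge (j + 1) k with hlt | hge
    · exact ⟨j + 1, hlt, hr1⟩
    · have : j + 1 = k := by omega
      exact hbase y (this ▸ hr1)

theorem pvLevelNonempty (room : Int) (mps : List Int) (adj : List (Int × List Int))
    (tstar : Nat) (m : Int) (hm : m ∈ mps) (hr : pvReach room adj tstar m)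
    (hmin : ∀ t < tstar, ∀ m' ∈ mps, ¬ pvReach room adj t m') :
    ∀ k < tstar, ∃ u, pvMinD room adj k u := by
  intro k hk
  by_contra hne
  obtain ⟨j, hj, hrj⟩ := pvContig room adj k hne tstar (le_of_lt hk) m hr
  exact hmin j (lt_trans hj hk) m hm hrj

-- ---- step lemmas ----
-- the predecessor of a node that is not reachable within k steps sits exactly at level k
theorem pvPred_minD (room : Int) (adj : List (Int × List Int)) (k : Nat) (w y : Int)
    (hw : pvReach room adj k w) (hyw : y ∈ pvNb adj w)
    (hnv : ¬ ∃ j ≤ k, pvReach room adj j y) : pvMinD room adj k w := by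
  obtain ⟨j0, hP, hminj⟩ := pvLeast (fun j => pvReach room adj j w) ⟨k, hw⟩
  have hj0k : j0 ≤ k := by
    by_contra hgt
    exact hminj k (by omega) hw
  rcases Nat.lt_or_ge j0 k with hlt | hge
  · exact absurd ⟨j0 + 1, by omega, ⟨w, hP, hyw⟩⟩ hnv
  · have : j0 = k := le_antisymm hj0k hge
    subst this
    exact ⟨hw, hminj⟩

theorem pvStep_hit (room : Int) (mps : List Int) (adj : List (Int × List Int)) (k : Nat)
    (v : PySem.Set Int) (f : List Int) (hinv : pvInv room mps adj k v f)
    (h : ∃ m ∈ mps, pvReach room adj (k + 1) m) :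
    pvLevelL mps adj f (k : Int) v [] = .inl ((k : Int) + 1) := by
  obtain ⟨hv, hf, hsil⟩ := hinv
  obtain ⟨m, hm, w, hw, hmw⟩ := h
  have hnv : ¬ ∃ j ≤ k, pvReach room adj j m := by
    rintro ⟨j, hj, hr⟩
    exact hsil j hj m hm hr
  have hwf : w ∈ f := (hf w).mpr (pvPred_minD room adj k w m hw hmw hnv)
  exact pvLevelL_hit mps adj f (k : Int) v [] ⟨w, hwf, m, hmw, hm⟩

theorem pvStep_miss (room : Int) (mps : List Int) (adj : List (Int × List Int)) (k : Nat)
    (v : PySem.Set Int) (f : List Int) (hinv : pvInv room mps adj k v f)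
    (h : ¬ ∃ m ∈ mps, pvReach room adj (k + 1) m) :
    ∃ v' f', pvLevelL mps adj f (k : Int) v [] = .inr (v', f') ∧
      pvInv room mps adj (k + 1) v' f' ∧ (∀ y ∈ v, y ∈ v') := by
  obtain ⟨hv, hf, hsil⟩ := hinv
  have hmiss : ∀ c ∈ f, ∀ n ∈ pvNb adj c, n ∉ mps := by
    intro c hc n hn hnm
    exact h ⟨n, hnm, ⟨c, ((hf c).mp hc).1, hn⟩⟩
  obtain ⟨v', f', heq, hv', hf'⟩ := pvLevelL_miss mps adj f (k : Int) v [] hmiss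
  refine ⟨v', f', heq, ⟨?_, ?_, ?_⟩, fun y hy => (hv' y).mpr (Or.inl hy)⟩
  · intro u
    rw [hv' u]
    constructor
    · rintro (hu | ⟨c, hc, hu⟩)
      · obtain ⟨j, hj, hr⟩ := (hv u).mp hu
        exact ⟨j, by omega, hr⟩
      · exact ⟨k + 1, le_refl _, ⟨c, ((hf c).mp hc).1, hu⟩⟩
    · rintro ⟨j, hj, hr⟩
      rcases Nat.lt_or_ge j (k + 1) with hlt | hge
      · exact Or.inl ((hv u).mpr ⟨j, by omega, hr⟩)
      · have hj1 : j = k + 1 := by omega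
        subst hj1
        by_cases huv : u ∈ v
        · exact Or.inl huv
        · obtain ⟨w, hw, huw⟩ := hr
          have hnv : ¬ ∃ j ≤ k, pvReach room adj j u := by
            rintro ⟨j', hj', hr'⟩
            exact huv ((hv u).mpr ⟨j', hj', hr'⟩)
          exact Or.inr ⟨w, (hf w).mpr (pvPred_minD room adj k w u hw huw hnv), huw⟩
  · intro u
    rw [hf' u]
    constructor
    · rintro (hu | ⟨⟨c, hc, hu⟩, huv⟩)
      · simp at hu
      · refine ⟨⟨c, ((hf c).mp hc).1, hu⟩, ?_⟩
        intro j hj hr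
        exact huv ((hv u).mpr ⟨j, by omega, hr⟩)
    · rintro ⟨hr, hmin⟩
      obtain ⟨w, hw, huw⟩ := hr
      have huv : u ∉ v := by
        intro huv
        obtain ⟨j, hj, hr'⟩ := (hv u).mp huv
        exact hmin j (by omega) hr'
      have hnv : ¬ ∃ j ≤ k, pvReach room adj j u := by
        rintro ⟨j, hj, hr'⟩
        exact hmin j (by omega) hr'
      exact Or.inr ⟨⟨w, (hf w).mpr (pvPred_minD room adj k w u hw huw hnv), huw⟩, huv⟩
  · intro t ht m hm hr
    rcases Nat.lt_or_ge t (k + 1) with hlt | hge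
    · exact hsil t (by omega) m hm hr
    · have : t = k + 1 := by omega
      subst this
      exact h ⟨m, hm, hr⟩

theorem pvUV_mono (adj : List (Int × List Int)) (v v' : PySem.Set Int)
    (h : ∀ y, y ∈ v → y ∈ v') : pvUV adj v' ≤ pvUV adj v := by
  unfold pvUV
  refine (List.monotone_filter_right _ ?_).length_le
  intro a ha
  simp only [Bool.not_eq_eq_eq_not, Bool.not_true] at ha ⊢
  rcases hc : PySem.Set.contains v a with _ | _
  · rfl
  · exact absurd (h a ((pvSet_contains_iff v a).mp hc)) (by simpa [pvSet_contains_iff] using ha)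

-- ---- loop conclusions for L ----
theorem pvLoopL_unreach (room : Int) (mps : List Int) (adj : List (Int × List Int))
    (hun : ∀ t, ∀ m ∈ mps, ¬ pvReach room adj t m) :
    ∀ (fuel : Nat) (v : PySem.Set Int) (f : List Int) (d : Int),
      (∀ c ∈ f, ∃ j, pvReach room adj j c) →
      pvLoopL mps adj fuel v f d = 0 := by
  intro fuel
  induction fuel with
  | zero => intro v f d _; rfl
  | succ fuel ih =>
    intro v f d hre
    match f with
    | [] => rfl
    | c :: cs =>
      have hmiss : ∀ c' ∈ c :: cs, ∀ n ∈ pvNb adj c', n ∉ mps := by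
        intro c' hc' n hn hnm
        obtain ⟨j, hj⟩ := hre c' hc'
        exact hun (j + 1) n hnm ⟨c', hj, hn⟩
      obtain ⟨v', f', heq, hv', hf'⟩ := pvLevelL_miss mps adj (c :: cs) d v [] hmiss
      simp only [pvLoopL, heq]
      refine ih v' f' (d + 1) ?_
      intro y hy
      rcases (hf' y).mp hy with hy' | ⟨⟨c', hc', hy'⟩, -⟩
      · simp at hy'
      · obtain ⟨j, hj⟩ := hre c' hc'
        exact ⟨j + 1, ⟨c', hj, hy'⟩⟩

theorem pvLoopL_reach (room : Int) (mps : List Int) (adj : List (Int × List Int))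
    (tstar : Nat) (hm : ∃ m ∈ mps, pvReach room adj tstar m)
    (hmin : ∀ t < tstar, ∀ m' ∈ mps, ¬ pvReach room adj t m') :
    ∀ (k : Nat) (v : PySem.Set Int) (f : List Int) (fuel : Nat),
      pvInv room mps adj k v f → k < tstar → pvUV adj v + 1 ≤ fuel →
      pvLoopL mps adj fuel v f (k : Int) = (tstar : Int) := by
  obtain ⟨m, hmm, hmr⟩ := hm
  intro k v f fuel
  induction fuel generalizing k v f with
  | zero => intro _ _ hfu; omega
  | succ fuel ih =>
    intro hinv hk hfu
    have hfne : ∃ u, u ∈ f := by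
      obtain ⟨u, hu⟩ := pvLevelNonempty room mps adj tstar m hmm hmr hmin k hk
      exact ⟨u, (hinv.2.1 u).mpr hu⟩
    match f, hfne with
    | c :: cs, _ =>
      rcases Nat.lt_or_ge (k + 1) tstar with hk1 | hge
      · have hnot : ¬ ∃ m' ∈ mps, pvReach room adj (k + 1) m' := by
          rintro ⟨m', hm', hr'⟩
          exact hmin (k + 1) hk1 m' hm' hr'
        obtain ⟨v', f', heq, hinv', hsub⟩ := pvStep_miss room mps adj k v (c :: cs) hinv hnot
        simp only [pvLoopL, heq]
        obtain ⟨x, hx⟩ := pvLevelNonempty room mps adj tstar m hmm hmr hmin (k + 1) hk1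
        have hxv' : x ∈ v' := (hinv'.1 x).mpr ⟨k + 1, le_refl _, hx.1⟩
        have hxv : x ∉ v := by
          intro hxv
          obtain ⟨j, hj, hr⟩ := (hinv.1 x).mp hxv
          exact hx.2 j (by omega) hr
        have hxnb : x ∈ pvAllNbrs adj := by
          obtain ⟨w, hw, hxw⟩ := hx.1
          exact pvGetD_subset adj w x hxw
        have hlt : pvUV adj v' < pvUV adj v := by
          have h1 : pvUV adj v' ≤ pvUV adj (PySem.Set.add v x) := by
            refine pvUV_mono adj (PySem.Set.add v x) v' ?_
            intro y hy
            rcases (PySem.Set.mem_add v x y).mp hy with hy' | rfl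
            · exact hsub y hy'
            · exact hxv'
          have h2 : pvUV adj (PySem.Set.add v x) < pvUV adj v := by
            refine pvUV_add_lt adj v x hxnb ?_
            rcases hc : PySem.Set.contains v x with _ | _
            · rfl
            · exact absurd ((pvSet_contains_iff v x).mp hc) hxv
          omega
        have := ih (k + 1) v' f' hinv' hk1 (by omega)
        rw [show ((k : Int) + 1) = ((k + 1 : Nat) : Int) by push_cast; ring]
        exact this
      · have hk1 : k + 1 = tstar := by omega
        have heq := pvStep_hit room mps adj k v (c :: cs) hinv ⟨m, hmm, by rw [hk1]; exact hmr⟩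
        simp only [pvLoopL, heq]
        push_cast [← hk1]
        ring

-- ---- bridges between pvReach and pvPathTo ----
theorem pvBridge1 (room : Int) (mps : List Int) (adj : List (Int × List Int)) :
    ∀ (t : Nat) (w : Int), pvReach room adj t w →
      ∀ n, pvPathTo mps adj n w → pvPathTo mps adj (t + n) room := by
  intro t
  induction t with
  | zero => intro w hw n hp; subst hw; simpa using hp
  | succ t ih =>
    intro w hw n hp
    obtain ⟨w', hw', hww'⟩ := hw
    have hp' : pvPathTo mps adj (n + 1) w' := ⟨w, hww', hp⟩
    have := ih w' hw' (n + 1) hp'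
    rw [show t + 1 + n = t + (n + 1) by omega]
    exact this

theorem pvBridge2 (room : Int) (mps : List Int) (adj : List (Int × List Int)) :
    ∀ (n : Nat) (u : Int) (k : Nat), pvReach room adj k u → pvPathTo mps adj n u →
      ∃ m ∈ mps, pvReach room adj (k + n) m := by
  intro n
  induction n with
  | zero => intro u k hr hp; exact ⟨u, hp, hr⟩
  | succ n ih =>
    intro u k hr hp
    obtain ⟨v, hv, hp'⟩ := hp
    obtain ⟨m, hm, hr'⟩ := ih v (k + 1) ⟨u, hr, hv⟩ hp'
    exact ⟨m, hm, by rw [show k + (n + 1) = k + 1 + n by omega]; exact hr'⟩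

theorem pvBridge (room : Int) (mps : List Int) (adj : List (Int × List Int)) (t : Nat) :
    (∃ m ∈ mps, pvReach room adj t m) ↔ pvPathTo mps adj t room := by
  constructor
  · rintro ⟨m, hm, hr⟩
    simpa using pvBridge1 room mps adj t m hr 0 (by simpa [pvPathTo] using hm)
  · intro hp
    simpa using pvBridge2 room mps adj t room 0 (by simp [pvReach]) hp

-- ---- B side: the distance table ----
def pvDI (mps : List Int) (adj : List (Int × List Int)) (d : PySem.Dict Int Int) : Prop :=
  d.keys.Nodup ∧
  (∀ m ∈ mps, d.get? m = some 0) ∧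
  (∀ u x, d.get? u = some x → ∃ n : Nat, x = (n : Int) ∧ pvPathTo mps adj n u) ∧
  (∀ u x, d.get? u = some x → 0 ≤ x ∧ x < d.size) ∧
  (∀ u, d.contains u = true → u ∈ mps ∨ u ∈ adj.map Prod.fst)

-- the fixpoint property the exit of the while loop guarantees
def pvFix (items : List (Int × List Int)) (d : PySem.Dict Int Int) : Prop :=
  ∀ p ∈ items, ∀ v ∈ p.2, ∀ dv, d.get? v = some dv → ∃ du, d.get? p.1 = some du ∧ du ≤ dv + 1

def pvSumVal (K : Nat) (d : PySem.Dict Int Int) : Nat :=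
  (d.values.map (fun x : Int => K - x.toNat)).sum

-- a node with a neighbour is a key of adj
theorem pvNb_mem (adj : List (Int × List Int)) (u v : Int) (hv : v ∈ pvNb adj u) :
    u ∈ adj.map Prod.fst := by
  unfold pvNb at hv
  induction adj with
  | nil => simp [PySem.Dict.getD, PySem.Dict.get?] at hv
  | cons p rest ih =>
    rw [PySem.Dict.getD, PySem.Dict.get?_mk_cons] at hv
    by_cases h : p.1 == u
    · simp only [List.map_cons, List.mem_cons]
      exact Or.inl (by simpa using (beq_iff_eq.mp h).symm)
    · simp only [h, Bool.false_eq_true, if_false] at hv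
      simp only [List.map_cons, List.mem_cons]
      exact Or.inr (ih (by rw [PySem.Dict.getD]; exact hv))

theorem pvItems_mem (adj : List (Int × List Int)) (u : Int) (ns : List Int) :
    (u, ns) ∈ pvItems adj ↔ u ∈ adj.map Prod.fst ∧ ns = pvNb adj u := by
  unfold pvItems
  rw [List.mem_map]
  constructor
  · rintro ⟨a, ha, heq⟩
    obtain ⟨rfl, rfl⟩ : a = u ∧ ((PySem.Dict.mk adj).getD a []) = ns := by
      constructor <;> [exact congrArg Prod.fst heq; exact congrArg Prod.snd heq]
    exact ⟨(PySem.List.mem_dedup _ a).mp ha, rfl⟩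
  · rintro ⟨hu, rfl⟩
    exact ⟨u, (PySem.List.mem_dedup _ u).mpr hu, rfl⟩

theorem pvFoldIns_get (l : List Int) (d : PySem.Dict Int Int) (u : Int) :
    (l.foldl (fun d m => d.insert m (0 : Int)) d).get? u =
      if u ∈ l then some 0 else d.get? u := by
  induction l generalizing d with
  | nil => simp
  | cons m l ih =>
    simp only [List.foldl_cons, ih, PySem.Dict.get?_insert]
    by_cases h1 : u ∈ l <;> by_cases h2 : u = m <;> simp [h1, h2]

theorem pvDist0_get (mps : List Int) (u : Int) :
    (mps.foldl (fun d m => d.insert m (0 : Int)) PySem.Dict.empty).get? u =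
      if u ∈ mps then some 0 else none := by
  rw [pvFoldIns_get]
  simp [PySem.Dict.get?_empty]

theorem pvDist0_nodup (mps : List Int) :
    (mps.foldl (fun d m => d.insert m (0 : Int)) PySem.Dict.empty).keys.Nodup := by
  exact PySem.Dict.nodup_keys_foldl_insert mps (fun _ _ => (0 : Int)) PySem.Dict.empty
    PySem.Dict.nodup_keys_empty

theorem pvSize_le (mps : List Int) (adj : List (Int × List Int)) (d : PySem.Dict Int Int)
    (hnd : d.keys.Nodup) (hk : ∀ u, d.contains u = true → u ∈ mps ∨ u ∈ adj.map Prod.fst) :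
    d.size ≤ mps.length + adj.length := by
  have hkeys : d.keys ⊆ mps ++ adj.map Prod.fst := by
    intro u hu
    rw [List.mem_append]
    rcases hk u ((PySem.Dict.contains_iff_mem_keys d u).mpr hu) with h | h
    · exact Or.inl h
    · exact Or.inr h
  have hlen : d.keys.length ≤ (mps ++ adj.map Prod.fst).length := by
    calc d.keys.length = d.keys.toFinset.card := by rw [List.toFinset_card_of_nodup hnd]
    _ ≤ (mps ++ adj.map Prod.fst).toFinset.card := by
        refine Finset.card_le_card ?_
        intro x hx
        simp only [List.mem_toFinset] at hx ⊢
        exact hkeys hx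
    _ ≤ (mps ++ adj.map Prod.fst).length := (mps ++ adj.map Prod.fst).toFinset_card_le
  have hsz : d.size = d.keys.length := by
    simp [PySem.Dict.keys, PySem.Dict.size]
  rw [hsz]
  simpa using hlen

-- sum over the value column after replacing the (unique) entry at key u
theorem pvReplace_sum (K : Nat) (u du cand : Int) :
    ∀ l : List (Int × Int), (l.map Prod.fst).Nodup → (u, du) ∈ l →
      ((l.map (fun p => if p.1 = u then (u, cand) else p)).map (fun p : Int × Int => K - p.2.toNat)).sum
        + (K - du.toNat)
      = (l.map (fun p : Int × Int => K - p.2.toNat)).sum + (K - cand.toNat) := by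
  intro l
  induction l with
  | nil => simp
  | cons p l ih =>
    intro hnd hmem
    rw [List.map_cons] at hnd
    have hnd' := List.nodup_cons.mp hnd
    rw [List.map_cons, List.map_cons, List.map_cons, List.sum_cons, List.sum_cons]
    by_cases hp : p.1 = u
    · have hdu : p = (u, du) := by
        rcases List.mem_cons.mp hmem with h | h
        · exact h.symm
        · refine absurd ?_ hnd'.1
          rw [hp]
          simpa using List.mem_map_of_mem (f := Prod.fst) h
      subst hdu
      have hid : l.map (fun q : Int × Int => if q.1 = u then (u, cand) else q) = l.map id := by
        refine List.map_congr_left ?_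
        intro q hq
        have hqu : q.1 ≠ u := by
          intro hqu
          refine hnd'.1 ?_
          rw [hp, ← hqu]
          exact List.mem_map_of_mem (f := Prod.fst) hq
        simp [hqu]
      rw [hid, List.map_id, if_pos rfl]
      omega
    · rw [if_neg hp]
      have hmem' : (u, du) ∈ l := by
        rcases List.mem_cons.mp hmem with h | h
        · exact absurd (congrArg Prod.fst h.symm) hp
        · exact h
      have := ih hnd'.2 hmem'
      omega

-- sum over values after an overwrite at an existing key
theorem pvSum_overwrite (K : Nat) (d : PySem.Dict Int Int) (u du cand : Int)
    (hnd : d.keys.Nodup) (hdu : d.get? u = some du) (h0 : 0 ≤ cand) (hlt : cand < du)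
    (hbd : du.toNat ≤ K) :
    pvSumVal K d < pvSumVal K (d.insert u cand) := by
  have hct : d.contains u = true := by
    rw [PySem.Dict.contains_eq_isSome_get?, hdu]; rfl
  have hitem : (u, du) ∈ d.items := PySem.Dict.mem_items_of_get?_eq_some d hdu
  unfold pvSumVal
  have hconv : d.items.map (fun p : Int × Int => if p.1 == u then (u, cand) else p)
      = d.items.map (fun p : Int × Int => if p.1 = u then (u, cand) else p) := by
    simp only [beq_iff_eq]
  have e1 : ((d.insert u cand).values.map (fun x : Int => K - x.toNat)).sum
      = ((d.items.map (fun p : Int × Int => if p.1 = u then (u, cand) else p)).map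
          (fun p : Int × Int => K - p.2.toNat)).sum := by
    rw [show (d.insert u cand).values = (d.insert u cand).items.map Prod.snd from rfl,
      PySem.Dict.items_insert_of_contains d cand hct, hconv]
    simp [List.map_map, Function.comp_def]
  have e2 : (d.values.map (fun x : Int => K - x.toNat)).sum
      = (d.items.map (fun p : Int × Int => K - p.2.toNat)).sum := by
    rw [show d.values = d.items.map Prod.snd from rfl]
    simp [List.map_map, Function.comp_def]
  rw [e1, e2]
  have hrepl := pvReplace_sum K u du cand d.items hnd hitem
  have h1 : cand.toNat < du.toNat := by omega
  omega

theorem pvSum_fresh (K : Nat) (d : PySem.Dict Int Int) (u cand : Int)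
    (hdu : d.get? u = none) (hc : cand.toNat < K) :
    pvSumVal K d < pvSumVal K (d.insert u cand) := by
  have hct : d.contains u = false := by
    rw [PySem.Dict.contains_eq_isSome_get?, hdu]; rfl
  unfold pvSumVal
  have hv : (d.insert u cand).values = d.values ++ [cand] := by
    rw [show (d.insert u cand).values = (d.insert u cand).items.map Prod.snd from rfl,
      PySem.Dict.items_insert_of_not_contains d cand hct]
    simp [PySem.Dict.values]
  rw [hv]
  simp
  omega

theorem pvSumVal_le (K : Nat) (d : PySem.Dict Int Int) (hsz : d.size ≤ K) :
    pvSumVal K d ≤ K * K := by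
  unfold pvSumVal
  have h1 : (d.values.map (fun x : Int => K - x.toNat)).sum ≤
      (d.values.map (fun x : Int => K - x.toNat)).length • K := by
    refine List.sum_le_card_nsmul _ K ?_
    intro x hx
    obtain ⟨y, -, rfl⟩ := List.mem_map.mp hx
    omega
  have h2 : (d.values.map (fun x : Int => K - x.toNat)).length = d.size := by
    simp [PySem.Dict.values, PySem.Dict.size]
  rw [h2] at h1
  calc (d.values.map (fun x : Int => K - x.toNat)).sum ≤ d.size • K := h1
  _ = d.size * K := smul_eq_mul _ _
  _ ≤ K * K := Nat.mul_le_mul_right K hsz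

-- once the changed flag is set, it stays set
theorem pvRelax_flag (u : Int) : ∀ (ns : List Int) (d : PySem.Dict Int Int),
    ∃ d', pvRelax u ns (d, true) = (d', true) := by
  intro ns
  induction ns with
  | nil => intro d; exact ⟨d, rfl⟩
  | cons v vs ih =>
    intro d
    simp only [pvRelax]
    cases hgv : d.get? v with
    | none => exact ih d
    | some dv =>
      cases hgu : d.get? u with
      | none => exact ih _
      | some du =>
        dsimp only
        by_cases hlt : dv + 1 < du
        · rw [if_pos hlt]; exact ih _
        · rw [if_neg hlt]; exact ih d

-- inserting a strictly improved finite distance preserves the table invariant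
theorem pvDI_insert (mps : List Int) (adj : List (Int × List Int)) (u dv : Int)
    (d : PySem.Dict Int Int) (hdi : pvDI mps adj d) (hu : u ∈ adj.map Prod.fst)
    (hwit : ∃ w, w ∈ pvNb adj u ∧ d.get? w = some dv)
    (hcase : d.get? u = none ∨ ∃ du, d.get? u = some du ∧ dv + 1 < du) :
    pvDI mps adj (d.insert u (dv + 1)) := by
  obtain ⟨hnd, hm0, hpath, hbnd, hkeys⟩ := hdi
  obtain ⟨w, hwnb, hwv⟩ := hwit
  have hdv0 : 0 ≤ dv := (hbnd w dv hwv).1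
  refine ⟨PySem.Dict.nodup_keys_insert d u (dv + 1) hnd, ?_, ?_, ?_, ?_⟩
  · intro m hm
    rw [PySem.Dict.get?_insert]
    split_ifs with hmu
    · subst hmu
      rcases hcase with h | ⟨du, hdu, hlt⟩
      · exact absurd (hm0 m hm) (by rw [h]; simp)
      · exfalso
        have := hm0 m hm
        rw [hdu] at this
        injection this with h0
        omega
    · exact hm0 m hm
  · intro x y hg
    rw [PySem.Dict.get?_insert] at hg
    split_ifs at hg with hxu
    · have hy : y = dv + 1 := by injection hg with h; omega
      obtain ⟨n, hn, hp⟩ := hpath w dv hwv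
      refine ⟨n + 1, by omega, ?_⟩
      subst hxu
      exact ⟨w, hwnb, hp⟩
    · exact hpath x y hg
  · intro x y hg
    have hszle : d.size ≤ (d.insert u (dv + 1)).size := by
      rw [PySem.Dict.size_insert]
      split_ifs <;> omega
    rw [PySem.Dict.get?_insert] at hg
    split_ifs at hg with hxu
    · have hdvlt : dv < d.size := (hbnd w dv hwv).2
      obtain ⟨rfl⟩ : dv + 1 = y := by injection hg
      rcases hcase with h | ⟨du, hdu, hlt⟩
      · have hct : d.contains u = false := by
          rw [PySem.Dict.contains_eq_isSome_get?, h]; rfl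
        rw [PySem.Dict.size_insert, hct]
        constructor
        · omega
        · simp only [Bool.false_eq_true, if_false]
          push_cast
          omega
      · have := (hbnd u du hdu).2
        constructor
        · omega
        · omega
    · have := hbnd x y hg
      constructor
      · exact this.1
      · omega
  · intro x hx
    rw [PySem.Dict.contains_iff_mem_keys, PySem.Dict.mem_keys_insert] at hx
    rcases hx with rfl | hx
    · exact Or.inr hu
    · exact hkeys x ((PySem.Dict.contains_iff_mem_keys d x).mpr hx)

-- relax preserves the invariant and never decreases the potential; a set flag means strict increase
theorem pvRelax_inv (mps : List Int) (adj : List (Int × List Int)) (u : Int)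
    (hu : u ∈ adj.map Prod.fst) :
    ∀ (ns : List Int) (d : PySem.Dict Int Int) (ch : Bool) (d' : PySem.Dict Int Int) (ch' : Bool),
      (∀ x ∈ ns, x ∈ pvNb adj u) →
      pvDI mps adj d →
      pvRelax u ns (d, ch) = (d', ch') →
      pvDI mps adj d' ∧
      pvSumVal (mps.length + adj.length) d ≤ pvSumVal (mps.length + adj.length) d' ∧
      (ch = false → ch' = true → pvSumVal (mps.length + adj.length) d < pvSumVal (mps.length + adj.length) d') ∧
      (ch' = false → d' = d ∧ ch = false ∧
        (∀ v ∈ ns, ∀ dv, d.get? v = some dv → ∃ du, d.get? u = some du ∧ du ≤ dv + 1)) := by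
  intro ns
  induction ns with
  | nil =>
    intro d ch d' ch' _ hdi hrel
    obtain ⟨rfl, rfl⟩ : d' = d ∧ ch' = ch := by
      constructor <;> [exact (congrArg Prod.fst hrel).symm; exact (congrArg Prod.snd hrel).symm]
    refine ⟨hdi, le_refl _, ?_, ?_⟩
    · intro h1 h2; rw [h1] at h2; cases h2
    · intro h; exact ⟨rfl, h, by simp⟩
  | cons v vs ih =>
    intro d ch d' ch' hns hdi hrel
    have hvnb : v ∈ pvNb adj u := hns v List.mem_cons_self
    have hns' : ∀ x ∈ vs, x ∈ pvNb adj u := fun x hx => hns x (List.mem_cons_of_mem _ hx)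
    simp only [pvRelax] at hrel
    cases hgv : d.get? v with
    | none =>
      rw [hgv] at hrel
      obtain ⟨h1, h2, h3, h4⟩ := ih d ch d' ch' hns' hdi hrel
      refine ⟨h1, h2, h3, ?_⟩
      intro hf
      obtain ⟨hd, hc, hfix⟩ := h4 hf
      refine ⟨hd, hc, ?_⟩
      intro x hx dv hdv
      rcases List.mem_cons.mp hx with rfl | hx
      · rw [hgv] at hdv; cases hdv
      · exact hfix x hx dv hdv
    | some dv =>
      rw [hgv] at hrel
      have hszK : ∀ (e : PySem.Dict Int Int), pvDI mps adj e → e.size ≤ mps.length + adj.length := by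
        intro e he
        exact pvSize_le mps adj e he.1 he.2.2.2.2
      cases hgu : d.get? u with
      | none =>
        rw [hgu] at hrel
        dsimp only at hrel
        have hdi1 : pvDI mps adj (d.insert u (dv + 1)) :=
          pvDI_insert mps adj u dv d hdi hu ⟨v, hvnb, hgv⟩ (Or.inl hgu)
        have hstr : pvSumVal (mps.length + adj.length) d <
            pvSumVal (mps.length + adj.length) (d.insert u (dv + 1)) := by
          refine pvSum_fresh _ d u (dv + 1) hgu ?_
          have hb := hdi1.2.2.2.1 u (dv + 1) (by rw [PySem.Dict.get?_insert]; simp)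
          have hsz := hszK _ hdi1
          omega
        obtain ⟨h1, h2, -, -⟩ := ih (d.insert u (dv + 1)) true d' ch' hns' hdi1 hrel
        obtain ⟨d'', hflag⟩ := pvRelax_flag u vs (d.insert u (dv + 1))
        have hch' : ch' = true := by
          rw [hflag] at hrel
          exact (congrArg Prod.snd hrel).symm
        refine ⟨h1, by omega, fun _ _ => by omega, ?_⟩
        intro h; rw [hch'] at h; cases h
      | some du =>
        rw [hgu] at hrel
        dsimp only at hrel
        by_cases hlt : dv + 1 < du
        · rw [if_pos hlt] at hrel
          have hdi1 : pvDI mps adj (d.insert u (dv + 1)) :=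
            pvDI_insert mps adj u dv d hdi hu ⟨v, hvnb, hgv⟩ (Or.inr ⟨du, hgu, hlt⟩)
          have hstr : pvSumVal (mps.length + adj.length) d <
              pvSumVal (mps.length + adj.length) (d.insert u (dv + 1)) := by
            refine pvSum_overwrite _ d u du (dv + 1) hdi.1 hgu ?_ hlt ?_
            · have := (hdi.2.2.2.1 v dv hgv).1
              omega
            · have := (hdi.2.2.2.1 u du hgu).2
              have hsz := hszK d hdi
              omega
          obtain ⟨h1, h2, -, -⟩ := ih (d.insert u (dv + 1)) true d' ch' hns' hdi1 hrel
          obtain ⟨d'', hflag⟩ := pvRelax_flag u vs (d.insert u (dv + 1))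
          have hch' : ch' = true := by
            rw [hflag] at hrel
            exact (congrArg Prod.snd hrel).symm
          refine ⟨h1, by omega, fun _ _ => by omega, ?_⟩
          intro h; rw [hch'] at h; cases h
        · rw [if_neg hlt] at hrel
          obtain ⟨h1, h2, h3, h4⟩ := ih d ch d' ch' hns' hdi hrel
          refine ⟨h1, h2, h3, ?_⟩
          intro hf
          obtain ⟨hd, hc, hfix⟩ := h4 hf
          refine ⟨hd, hc, ?_⟩
          intro x hx dx hdx
          rcases List.mem_cons.mp hx with rfl | hx
          · rw [hgv] at hdx
            have : dx = dv := by injection hdx with h; omega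
            subst this
            exact ⟨du, rfl, by omega⟩
          · rw [← hgu]
            exact hfix x hx dx hdx

theorem pvPass_inv (mps : List Int) (adj : List (Int × List Int)) :
    ∀ (items : List (Int × List Int)) (d : PySem.Dict Int Int) (ch : Bool) (d' : PySem.Dict Int Int) (ch' : Bool),
      (∀ p ∈ items, p ∈ pvItems adj) →
      pvDI mps adj d →
      pvPass items (d, ch) = (d', ch') →
      pvDI mps adj d' ∧
      pvSumVal (mps.length + adj.length) d ≤ pvSumVal (mps.length + adj.length) d' ∧
      (ch = false → ch' = true → pvSumVal (mps.length + adj.length) d < pvSumVal (mps.length + adj.length) d') ∧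
      (ch' = false → d' = d ∧ ch = false ∧ pvFix items d) := by
  intro items
  induction items with
  | nil =>
    intro d ch d' ch' _ hdi hrel
    obtain ⟨rfl, rfl⟩ : d' = d ∧ ch' = ch := by
      constructor <;> [exact (congrArg Prod.fst hrel).symm; exact (congrArg Prod.snd hrel).symm]
    refine ⟨hdi, le_refl _, ?_, ?_⟩
    · intro h1 h2; rw [h1] at h2; cases h2
    · intro h; exact ⟨rfl, h, by intro p hp; cases hp⟩
  | cons p rest ih =>
    intro d ch d' ch' hpi hdi hrel
    obtain ⟨u, ns⟩ := p
    obtain ⟨hu, hns⟩ := (pvItems_mem adj u ns).mp (hpi (u, ns) List.mem_cons_self)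
    have hns' : ∀ x ∈ ns, x ∈ pvNb adj u := by
      intro x hx; rw [← hns]; exact hx
    simp only [pvPass] at hrel
    rcases hrx : pvRelax u ns (d, ch) with ⟨d1, ch1⟩
    rw [hrx] at hrel
    obtain ⟨hdi1, hle1, hstr1, hfx1⟩ := pvRelax_inv mps adj u hu ns d ch d1 ch1 hns' hdi hrx
    obtain ⟨hdi2, hle2, hstr2, hfx2⟩ :=
      ih d1 ch1 d' ch' (fun q hq => hpi q (List.mem_cons_of_mem _ hq)) hdi1 hrel
    refine ⟨hdi2, le_trans hle1 hle2, ?_, ?_⟩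
    · intro h1 h2
      cases hch1 : ch1 with
      | true => exact lt_of_lt_of_le (hstr1 h1 hch1) hle2
      | false =>
        obtain ⟨hd1, -, -⟩ := hfx1 hch1
        subst hd1
        exact hstr2 hch1 h2
    · intro h
      obtain ⟨hd2, hch1, hfixrest⟩ := hfx2 h
      obtain ⟨hd1, hch, hfixhead⟩ := hfx1 hch1
      subst hd1
      refine ⟨hd2, hch, ?_⟩
      intro q hq x hx dx hdx
      rcases List.mem_cons.mp hq with rfl | hq
      · exact hfixhead x hx dx hdx
      · exact hfixrest q hq x hx dx hdx

theorem pvBFLoop_fix (mps : List Int) (adj : List (Int × List Int)) :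
    ∀ (fuel : Nat) (d : PySem.Dict Int Int),
      pvDI mps adj d →
      (mps.length + adj.length) * (mps.length + adj.length) + 1 ≤
        fuel + pvSumVal (mps.length + adj.length) d →
      pvDI mps adj (pvBFLoop (pvItems adj) fuel d) ∧ pvFix (pvItems adj) (pvBFLoop (pvItems adj) fuel d) := by
  intro fuel
  induction fuel with
  | zero =>
    intro d hdi hfu
    exfalso
    have hsz : d.size ≤ mps.length + adj.length := pvSize_le mps adj d hdi.1 hdi.2.2.2.2
    have := pvSumVal_le (mps.length + adj.length) d hsz
    omega
  | succ fuel ih =>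
    intro d hdi hfu
    rcases hpass : pvPass (pvItems adj) (d, false) with ⟨d1, ch1⟩
    obtain ⟨hdi1, hle1, hstr1, hfx1⟩ :=
      pvPass_inv mps adj (pvItems adj) d false d1 ch1 (fun q hq => hq) hdi hpass
    cases hch1 : ch1 with
    | false =>
      subst hch1
      obtain ⟨hd1, -, hfix⟩ := hfx1 rfl
      subst hd1
      simp only [pvBFLoop, hpass]
      exact ⟨hdi, hfix⟩
    | true =>
      subst hch1
      simp only [pvBFLoop, hpass]
      exact ih d1 hdi1 (by have := hstr1 rfl rfl; omega)

-- at the fixpoint, every node with a path of length n holds a value ≤ n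
theorem pvFix_upper (mps : List Int) (adj : List (Int × List Int)) (d : PySem.Dict Int Int)
    (hdi : pvDI mps adj d) (hfix : pvFix (pvItems adj) d) :
    ∀ (n : Nat) (u : Int), pvPathTo mps adj n u → ∃ x, d.get? u = some x ∧ x ≤ (n : Int) := by
  intro n
  induction n with
  | zero =>
    intro u hu
    exact ⟨0, hdi.2.1 u hu, by omega⟩
  | succ n ih =>
    intro u hu
    obtain ⟨v, hv, hp⟩ := hu
    obtain ⟨xv, hxv, hxle⟩ := ih v hp
    have hukey : u ∈ adj.map Prod.fst := pvNb_mem adj u v hv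
    have hitem : (u, pvNb adj u) ∈ pvItems adj := (pvItems_mem adj u (pvNb adj u)).mpr ⟨hukey, rfl⟩
    obtain ⟨du, hdu, hdule⟩ := hfix (u, pvNb adj u) hitem v hv xv hxv
    exact ⟨du, hdu, by omega⟩

-- ===== VERDICT (by name: the statement is the Claim_ definition above) =====
theorem calculate_branch_depth_py_spec : Claim_equal_calculate_branch_depth_py := by
  intro room mps adj _
  unfold Spec_calculate_branch_depth_py
  by_cases hroom : mps.contains room = true
  · unfold calculate_branch_depth_py calculate_branch_depth_py_alt
    simp only [hroom, if_true]
  · have hrc : mps.contains room = false := by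
      rcases h : mps.contains room with _ | _
      · rfl
      · exact absurd h hroom
    have hrm : room ∉ mps := fun h => hroom (List.contains_iff_mem.mpr h)
    -- the fixpoint table B computes
    have hdi0 : pvDI mps adj (mps.foldl (fun d m => d.insert m (0 : Int)) PySem.Dict.empty) := by
      refine ⟨pvDist0_nodup mps, ?_, ?_, ?_, ?_⟩
      · intro m hm; rw [pvDist0_get]; simp [hm]
      · intro u x hg
        rw [pvDist0_get] at hg
        split_ifs at hg with hu
        exact ⟨0, by injection hg with h; omega, by simpa [pvPathTo] using hu⟩
      · intro u x hg
        have hg' := hg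
        rw [pvDist0_get] at hg'
        split_ifs at hg' with hu
        have hx0 : x = 0 := by injection hg' with h; omega
        have hpos : 0 < (mps.foldl (fun d m => d.insert m (0 : Int)) PySem.Dict.empty).size := by
          have hct := PySem.Dict.contains_eq_isSome_get?
            (mps.foldl (fun d m => d.insert m (0 : Int)) PySem.Dict.empty) u
          rw [hg] at hct
          have hk := (PySem.Dict.contains_iff_mem_keys _ u).mp hct
          have hne : (mps.foldl (fun d m => d.insert m (0 : Int)) PySem.Dict.empty).keys ≠ [] := by
            intro hnil; rw [hnil] at hk; cases hk
          have hsz : (mps.foldl (fun d m => d.insert m (0 : Int)) PySem.Dict.empty).size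
              = (mps.foldl (fun d m => d.insert m (0 : Int)) PySem.Dict.empty).keys.length := by
            simp [PySem.Dict.keys, PySem.Dict.size]
          rw [hsz]
          cases hkk : (mps.foldl (fun d m => d.insert m (0 : Int)) PySem.Dict.empty).keys with
          | nil => exact absurd hkk hne
          | cons a l => simp
        omega
      · intro u hc
        have hg := PySem.Dict.contains_eq_isSome_get?
          (mps.foldl (fun d m => d.insert m (0 : Int)) PySem.Dict.empty) u
        rw [hc, pvDist0_get] at hg
        split_ifs at hg with hu
        · exact Or.inl hu
        · simp at hg
    obtain ⟨hdiF, hfixF⟩ := pvBFLoop_fix mps adj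
      ((mps.length + adj.length) * (mps.length + adj.length) + 1)
      (mps.foldl (fun d m => d.insert m (0 : Int)) PySem.Dict.empty) hdi0 (by omega)
    have hBval : calculate_branch_depth_py_alt room mps adj =
        (pvBFLoop (pvItems adj) ((mps.length + adj.length) * (mps.length + adj.length) + 1)
          (mps.foldl (fun d m => d.insert m (0 : Int)) PySem.Dict.empty)).getD room 0 := by
      unfold calculate_branch_depth_py_alt
      simp only [hrc, Bool.false_eq_true, if_false]
    have hinv0 : pvInv room mps adj 0 (PySem.Set.ofList [room]) [room] := by
      refine ⟨?_, ?_, ?_⟩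
      · intro u
        constructor
        · intro hu
          have : u = room := by simpa using (PySem.Set.mem_ofList [room] u).mp hu
          exact ⟨0, le_refl _, this⟩
        · rintro ⟨j, hj, hr⟩
          have hj0 : j = 0 := by omega
          subst hj0
          exact (PySem.Set.mem_ofList [room] u).mpr (by simp [show u = room from hr])
      · intro u
        constructor
        · intro hu
          refine ⟨by simpa using hu, ?_⟩
          intro j hj
          omega
        · rintro ⟨hr, -⟩
          simpa using hr
      · intro t ht m hm hr
        have ht0 : t = 0 := by omega
        subst ht0
        exact hrm (by rwa [show m = room from hr] at hm)
    by_cases hre : ∃ n, pvPathTo mps adj n room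
    · obtain ⟨tstar, hP, hminP⟩ := pvLeast _ hre
      have htpos : 0 < tstar := by
        rcases Nat.eq_zero_or_pos tstar with h0 | h
        · subst h0
          exact absurd (by simpa [pvPathTo] using hP) hrm
        · exact h
      have hmR : ∃ m ∈ mps, pvReach room adj tstar m := (pvBridge room mps adj tstar).mpr hP
      have hminR : ∀ t < tstar, ∀ m' ∈ mps, ¬ pvReach room adj t m' := by
        intro t ht m' hm' hr
        exact hminP t ht ((pvBridge room mps adj t).mp ⟨m', hm', hr⟩)
      -- A returns tstar
      have hA : calculate_branch_depth_py room mps adj = (tstar : Int) := by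
        rw [pvA_eq_L room mps adj hrc]
        have := pvLoopL_reach room mps adj tstar hmR hminR 0 (PySem.Set.ofList [room]) [room]
          ((pvAllNbrs adj).length + 2) hinv0 htpos
          (by have : pvUV adj (PySem.Set.ofList [room]) ≤ (pvAllNbrs adj).length :=
                List.length_filter_le _ _
              omega)
        simpa using this
      -- B returns tstar
      have hB : calculate_branch_depth_py_alt room mps adj = (tstar : Int) := by
        rw [hBval]
        obtain ⟨x, hx, hxle⟩ := pvFix_upper mps adj _ hdiF hfixF tstar room hP
        obtain ⟨n, hn, hpn⟩ := hdiF.2.2.1 room x hx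
        have hge : tstar ≤ n := by
          by_contra hlt
          exact hminP n (by omega) hpn
        have hxt : x = (tstar : Int) := by omega
        rw [PySem.Dict.getD_eq_get?_getD, hx, hxt]
        rfl
      rw [hA, hB]
    · -- no path at all: both return 0
      have hun : ∀ t, ∀ m ∈ mps, ¬ pvReach room adj t m := by
        intro t m hm hr
        exact hre ⟨t, (pvBridge room mps adj t).mp ⟨m, hm, hr⟩⟩
      have hA : calculate_branch_depth_py room mps adj = 0 := by
        rw [pvA_eq_L room mps adj hrc]
        exact pvLoopL_unreach room mps adj hun _ _ _ _
          (by intro c hc; exact ⟨0, by simpa using hc⟩)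
      have hB : calculate_branch_depth_py_alt room mps adj = 0 := by
        rw [hBval]
        cases hg : (pvBFLoop (pvItems adj) ((mps.length + adj.length) * (mps.length + adj.length) + 1)
            (mps.foldl (fun d m => d.insert m (0 : Int)) PySem.Dict.empty)).get? room with
        | none => rw [PySem.Dict.getD_eq_get?_getD, hg]; rfl
        | some x =>
          obtain ⟨n, -, hpn⟩ := hdiF.2.2.1 room x hg
          exact absurd ⟨n, hpn⟩ hre
      rw [hA, hB]
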